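-- pv_equiv track=rewrite | github.com/LegnaOS/kiro-ngx | anthropic_api/handlers.py | _find_fallback_json_start
-- ===== SOURCE A (Python) =====
-- from typing import Any, Dict, List, Optional
--
-- FALLBACK_JSON_CANDIDATE_PREFIXES = (
--     '{"content":',
--     '{"name":',
--     '{"followupPrompt":',
--     '{"input":',
--     '{"stop":',
--     '{"contextUsagePercentage":',
-- )
--
-- def _find_fallback_json_start(buffer: str, search_start: int = 0) -> Optional[int]:
--     candidates = [
--         buffer.find(prefix, search_start)
--         for prefix in FALLBACK_JSON_CANDIDATE_PREFIXES
--     ]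
--     candidates = [pos for pos in candidates if pos >= 0]
--     if not candidates:
--         return None
--     return min(candidates)
-- ===== SOURCE B (Python) =====
-- FALLBACK_JSON_CANDIDATE_PREFIXES = (
--     '{"content":',
--     '{"name":',
--     '{"followupPrompt":',
--     '{"input":',
--     '{"stop":',
--     '{"contextUsagePercentage":',
-- )
--
-- def _find_fallback_json_start(buffer: str, search_start: int = 0):
--     start = search_start if search_start >= 0 else max(0, len(buffer) + search_start)
--     for i in range(start, len(buffer)):
--         if buffer.startswith(FALLBACK_JSON_CANDIDATE_PREFIXES, i):
--             return i
--     return None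
-- ===== Notes on version B (the rewrite author's own statement) =====
-- stated objective: alternative
-- what changed: Replaced the per-prefix find + min over candidates with a single left-to-right scan over buffer positions that tests all candidate prefixes at each position via startswith and returns at the first match.
import Mathlib
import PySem

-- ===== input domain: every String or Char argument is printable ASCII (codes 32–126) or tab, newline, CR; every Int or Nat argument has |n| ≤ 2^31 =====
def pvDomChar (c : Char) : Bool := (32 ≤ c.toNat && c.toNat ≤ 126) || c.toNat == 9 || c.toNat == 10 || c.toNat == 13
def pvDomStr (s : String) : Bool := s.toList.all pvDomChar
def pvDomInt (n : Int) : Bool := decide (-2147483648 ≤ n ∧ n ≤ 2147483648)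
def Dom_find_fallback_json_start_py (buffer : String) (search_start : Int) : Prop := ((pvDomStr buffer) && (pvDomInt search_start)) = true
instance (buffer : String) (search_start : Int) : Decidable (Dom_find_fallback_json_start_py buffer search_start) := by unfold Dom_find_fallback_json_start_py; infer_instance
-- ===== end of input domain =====

-- B replaces A's per-prefix find + min over candidates with a single left-to-right scan that
-- returns the first position where any candidate prefix matches (alternative decomposition).

def pvPrefixes : List String :=
  ["{\"content\":", "{\"name\":", "{\"followupPrompt\":", "{\"input\":", "{\"stop\":",
   "{\"contextUsagePercentage\":"]

-- ===== PORT A =====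
def find_fallback_json_start_py (buffer : String) (search_start : Int) : Option Int :=
  let candidates := pvPrefixes.map (fun prefix_ => PySem.Str.findFrom buffer prefix_ search_start)
  let candidates := candidates.filter (fun pos => decide (0 ≤ pos))
  if candidates = [] then none
  else PySem.List.min? candidates (fun x => x)

-- ===== PORT B =====
-- buffer.startswith(PREFIXES, i) with 0 ≤ i is exactly: some prefix startswith-matches buffer[i:].
def find_fallback_json_start_py_alt (buffer : String) (search_start : Int) : Option Int :=
  let L := buffer.toList
  let n : Int := L.length
  let start : Int := if 0 ≤ search_start then search_start else max 0 (n + search_start)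
  (PySem.List.pyRange start n 1).find?
    (fun i => pvPrefixes.any (fun p => PySem.Chars.startswith (L.drop i.toNat) p.toList))

-- ===== PRECONDITION & SPEC =====
def Spec_find_fallback_json_start_py (buffer : String) (search_start : Int) (out : Option Int) : Prop := out = find_fallback_json_start_py_alt buffer search_start
instance (buffer : String) (search_start : Int) (out : Option Int) : Decidable (Spec_find_fallback_json_start_py buffer search_start out) := by unfold Spec_find_fallback_json_start_py; infer_instance

-- ===== CLAIM (what is proved, stated in full; the proofs are below) =====
def Claim_equal_find_fallback_json_start_py : Prop := ∀ (buffer : String) (search_start : Int), Dom_find_fallback_json_start_py buffer search_start → Spec_find_fallback_json_start_py buffer search_start (find_fallback_json_start_py buffer search_start)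

-- ===== LEMMAS AND PROOFS =====

lemma pvPrefixes_ne_nil : ∀ p ∈ pvPrefixes, p.toList ≠ [] := by decide

lemma pvDropSuffix (L : List Char) (a b : Nat) (h : b ≤ a) : L.drop a <:+ L.drop b := by
  rw [show a = b + (a - b) by omega, ← List.drop_drop]
  exact List.drop_suffix _ _

-- if no prefix match at position k, the search from k equals the search from k+1
lemma pvStep (L p : List Char) (k : Nat) (hk : k < L.length) (hnp : ¬ p <+: L.drop k) :
    PySem.Chars.findFrom L p (k : Int) = PySem.Chars.findFrom L p ((k+1 : Nat) : Int) := by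
  have hk0 : k ≤ L.length := le_of_lt hk
  have hk1 : k + 1 ≤ L.length := hk
  by_cases hF : PySem.Chars.findFrom L p (k : Int) = -1
  · have h1 := (PySem.Chars.findFrom_natCast_eq_neg_one_iff L p k hk0).mp hF
    rw [hF]; symm
    rw [PySem.Chars.findFrom_natCast_eq_neg_one_iff L p (k+1) hk1]
    exact fun hinf => h1 (hinf.trans (pvDropSuffix L (k+1) k (by omega)).isInfix)
  · obtain ⟨hge, hpre, hmin⟩ := PySem.Chars.findFrom_natCast_spec L p k hk0 hF
    set F := PySem.Chars.findFrom L p (k : Int) with hFdef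
    have hFk : k + 1 ≤ F.toNat := by
      rcases Nat.lt_or_ge F.toNat (k+1) with h | h
      · have hFt : F.toNat = k := by omega
        exact absurd (hFt ▸ hpre) hnp
      · exact h
    have hG : PySem.Chars.findFrom L p ((k+1 : Nat) : Int) ≠ -1 := by
      rw [Ne, PySem.Chars.findFrom_natCast_eq_neg_one_iff L p (k+1) hk1]
      intro h
      exact h (hpre.isInfix.trans (pvDropSuffix L F.toNat (k+1) hFk).isInfix)
    obtain ⟨hge', hpre', hmin'⟩ := PySem.Chars.findFrom_natCast_spec L p (k+1) hk1 hG
    set G := PySem.Chars.findFrom L p ((k+1 : Nat) : Int) with hGdef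
    have h1 : ¬ G.toNat < F.toNat := fun h => hmin G.toNat (by omega) h hpre'
    have h2 : ¬ F.toNat < G.toNat := fun h => hmin' F.toNat hFk h hpre
    omega

-- a prefix match at position k makes the search from k return k
lemma pvAtMatch (L p : List Char) (k : Nat) (hk : k ≤ L.length) (hp : p <+: L.drop k) :
    PySem.Chars.findFrom L p (k : Int) = (k : Int) := by
  have hF : PySem.Chars.findFrom L p (k : Int) ≠ -1 := by
    rw [Ne, PySem.Chars.findFrom_natCast_eq_neg_one_iff L p k hk]
    exact fun h => h hp.isInfix
  obtain ⟨hge, hpre, hmin⟩ := PySem.Chars.findFrom_natCast_spec L p k hk hF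
  rcases Nat.lt_or_ge k (PySem.Chars.findFrom L p (k : Int)).toNat with h | h
  · exact absurd hp (hmin k le_rfl h)
  · omega

-- the heart: for a clamped start k ≤ n, A's filter/min equals B's first-match scan
lemma pvMainAux (L : List Char) (m : Nat) : ∀ k : Nat, L.length - k ≤ m → k ≤ L.length →
    (if ((pvPrefixes.map (fun p => PySem.Chars.findFrom L p.toList (k : Int))).filter
        (fun pos => decide (0 ≤ pos))) = [] then none
     else PySem.List.min? ((pvPrefixes.map (fun p => PySem.Chars.findFrom L p.toList (k : Int))).filter
        (fun pos => decide (0 ≤ pos))) (fun x => x))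
    = (PySem.List.pyRange (k : Int) (L.length : Int) 1).find?
        (fun i => pvPrefixes.any (fun p => PySem.Chars.startswith (L.drop i.toNat) p.toList)) := by
  induction m with
  | zero =>
    intro k hm hk
    have hkn : k = L.length := by omega
    subst hkn
    have hfilter : ((pvPrefixes.map (fun p => PySem.Chars.findFrom L p.toList (L.length : Int))).filter
        (fun pos => decide (0 ≤ pos))) = [] := by
      rw [List.filter_eq_nil_iff]
      intro a ha
      obtain ⟨p, hp, rfl⟩ := List.mem_map.mp ha
      have : PySem.Chars.findFrom L p.toList (L.length : Int) = -1 := by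
        rw [PySem.Chars.findFrom_natCast_eq_neg_one_iff L p.toList L.length le_rfl]
        simp only [List.drop_length, List.infix_nil]
        exact pvPrefixes_ne_nil p hp
      rw [this]; decide
    rw [if_pos hfilter, PySem.List.pyRange_one_eq_nil le_rfl]
    rfl
  | succ m ih =>
    intro k hm hk
    rcases Nat.lt_or_ge k L.length with hlt | hge
    · rw [PySem.List.pyRange_one_cons (by exact_mod_cast hlt)]
      by_cases hmatch : ∃ p ∈ pvPrefixes, p.toList <+: L.drop k
      · -- earliest match is at k itself: both sides give k
        have hpred : (pvPrefixes.any (fun p => PySem.Chars.startswith (L.drop ((k:Int)).toNat) p.toList)) = true := by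
          rw [List.any_eq_true]
          obtain ⟨p, hp, hpre⟩ := hmatch
          exact ⟨p, hp, by rw [PySem.Chars.startswith_iff]; simpa using hpre⟩
        rw [List.find?_cons, hpred]
        obtain ⟨p0, hp0, hp0pre⟩ := hmatch
        have hF0 := pvAtMatch L p0.toList k (le_of_lt hlt) hp0pre
        have hmem : ((k : Int)) ∈ ((pvPrefixes.map (fun p => PySem.Chars.findFrom L p.toList (k : Int))).filter
            (fun pos => decide (0 ≤ pos))) :=
          List.mem_filter.mpr ⟨List.mem_map.mpr ⟨p0, hp0, hF0⟩, by simp⟩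
        rw [if_neg (List.ne_nil_of_mem hmem)]
        cases hmo : PySem.List.min? ((pvPrefixes.map (fun p => PySem.Chars.findFrom L p.toList (k : Int))).filter
            (fun pos => decide (0 ≤ pos))) (fun x => x) with
        | none =>
          exact absurd ((PySem.List.min?_eq_none_iff _ _).mp hmo) (List.ne_nil_of_mem hmem)
        | some mv =>
          have hmvmem := PySem.List.min?_mem hmo
          obtain ⟨hmap, hpos⟩ := List.mem_filter.mp hmvmem
          obtain ⟨p1, hp1, hF1⟩ := List.mem_map.mp hmap
          have hpos' : (0:Int) ≤ mv := by simpa using hpos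
          have hne1 : PySem.Chars.findFrom L p1.toList (k : Int) ≠ -1 := by omega
          have hge1 := (PySem.Chars.findFrom_natCast_spec L p1.toList k (le_of_lt hlt) hne1).1
          rw [hF1] at hge1
          have hle := PySem.List.min?_isMin hmo _ hmem
          simp only [] at hle
          congr 1
          omega
      · -- no match at k: advance both sides by one position
        push Not at hmatch
        have hpred : (pvPrefixes.any (fun p => PySem.Chars.startswith (L.drop ((k:Int)).toNat) p.toList)) = false := by
          rw [List.any_eq_false]
          intro p hp
          rw [PySem.Chars.startswith_iff]
          simpa using hmatch p hp
        rw [List.find?_cons, hpred]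
        have hmapc : (pvPrefixes.map (fun p => PySem.Chars.findFrom L p.toList (k : Int)))
            = (pvPrefixes.map (fun p => PySem.Chars.findFrom L p.toList ((k+1 : Nat) : Int))) := by
          apply List.map_congr_left
          intro p hp
          exact pvStep L p.toList k hlt (hmatch p hp)
        rw [hmapc, show ((k : Int) + 1) = ((k+1 : Nat) : Int) by push_cast; ring]
        exact ih (k+1) (by omega) hlt
    · have hkn : k = L.length := by omega
      subst hkn
      have hfilter : ((pvPrefixes.map (fun p => PySem.Chars.findFrom L p.toList (L.length : Int))).filter
          (fun pos => decide (0 ≤ pos))) = [] := by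
        rw [List.filter_eq_nil_iff]
        intro a ha
        obtain ⟨p, hp, rfl⟩ := List.mem_map.mp ha
        have : PySem.Chars.findFrom L p.toList (L.length : Int) = -1 := by
          rw [PySem.Chars.findFrom_natCast_eq_neg_one_iff L p.toList L.length le_rfl]
          simp only [List.drop_length, List.infix_nil]
          exact pvPrefixes_ne_nil p hp
        rw [this]; decide
      rw [if_pos hfilter, PySem.List.pyRange_one_eq_nil le_rfl]
      rfl

-- a start strictly past the end of the string makes find return -1
lemma pvPastEnd (L p : List Char) (s : Int) (h : (L.length : Int) < s) :
    PySem.Chars.findFrom L p s = -1 := by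
  simp only [PySem.Chars.findFrom]
  rw [if_neg (by omega : ¬ s < 0), if_pos h]

-- a negative start is clamped to max(0, len + start)
lemma pvClampNeg (L p : List Char) (s : Int) (hs : s < 0) :
    PySem.Chars.findFrom L p s
      = PySem.Chars.findFrom L p (if s + L.length < 0 then 0 else s + L.length) := by
  simp only [PySem.Chars.findFrom]
  rw [if_pos hs]
  by_cases h0 : s + (L.length : Int) < 0
  · rw [if_pos h0]; norm_num
  · rw [if_neg h0, if_neg h0]

-- ===== VERDICT (by name: the statement is the Claim_ definition above) =====
theorem find_fallback_json_start_py_spec : Claim_equal_find_fallback_json_start_py := by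
  intro buffer s _
  show find_fallback_json_start_py buffer s = find_fallback_json_start_py_alt buffer s
  simp only [find_fallback_json_start_py, find_fallback_json_start_py_alt, PySem.Str.findFrom_eq]
  set L := buffer.toList with hL
  rcases lt_or_ge s 0 with hneg | hpos
  · -- negative start: both sides clamp to k = max 0 (len + s)
    rw [if_neg (by omega : ¬ 0 ≤ s)]
    set c : Int := if s + (L.length : Int) < 0 then 0 else s + L.length with hc
    have hc0 : 0 ≤ c := by rw [hc]; split_ifs <;> omega
    have hcn : c ≤ (L.length : Int) := by rw [hc]; split_ifs <;> omega
    have hmax : max 0 ((L.length : Int) + s) = c := by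
      rw [hc]; split_ifs with h
      · exact max_eq_left (by omega)
      · rw [max_eq_right (by omega)]; ring
    have hmapc : (pvPrefixes.map (fun prefix_ => PySem.Chars.findFrom L prefix_.toList s))
        = (pvPrefixes.map (fun prefix_ => PySem.Chars.findFrom L prefix_.toList ((c.toNat : Nat) : Int))) := by
      apply List.map_congr_left
      intro p hp
      rw [pvClampNeg L p.toList s hneg, ← hc, Int.toNat_of_nonneg hc0]
    clear_value c
    rw [hmax, hmapc, show c = ((c.toNat : Nat) : Int) from (Int.toNat_of_nonneg hc0).symm]
    have hck : c.toNat ≤ L.length := by omega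
    exact pvMainAux L L.length c.toNat (Nat.sub_le _ _) hck
  · rw [if_pos hpos]
    rcases le_or_gt s (L.length : Int) with hle | hgt
    · rw [show s = ((s.toNat : Nat) : Int) from (Int.toNat_of_nonneg hpos).symm]
      exact pvMainAux L L.length s.toNat (by omega) (by omega)
    · -- start past the end: every find returns -1 and the scan range is empty
      have hfilter : ((pvPrefixes.map (fun prefix_ => PySem.Chars.findFrom L prefix_.toList s)).filter
          (fun pos => decide (0 ≤ pos))) = [] := by
        rw [List.filter_eq_nil_iff]
        intro a ha
        obtain ⟨p, hp, rfl⟩ := List.mem_map.mp ha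
        rw [pvPastEnd L p.toList s hgt]; decide
      rw [if_pos hfilter, PySem.List.pyRange_one_eq_nil (by omega)]
      rfl
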